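-- pv_equiv track=rewrite | github.com/jarvislam1999/CMSSW-12100-Homework | pp/kattis/blackfriday.py | solve
-- ===== SOURCE A (Python) =====
-- def solve(rolls):
--     """
--     Parameters:
--      - rolls: List of integers. The outcome of each participant's die roll.
--
--     Returns: Integer, or None.
--              The index of the participat that has the highest unique outcome.
--              If no such participant exists, return None.
--     """
--
--     # Your code here.
--     if (len(rolls) == 0):
--         return None
--     if (len(rolls) == 1):
--         return 1
--     roll = sorted(rolls, reverse = True)
--     if roll[0] != roll[1]:
--         return rolls.index(roll[0]) + 1
--     for i in range(1, len(roll) - 2):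
--         if (roll[i] != roll[i+1]):
--             if (roll[i + 1] != roll[i + 2]):
--                 return rolls.index(roll[i+1]) + 1
--     if (roll[len(rolls) - 1] != roll[len(rolls) -2]):
--         return rolls.index(roll[len(rolls) - 1]) + 1
--     # Replace "None" with a suitable return value.
--     return None
-- ===== SOURCE B (Python) =====
-- def solve(rolls):
--     counts = {}
--     for v in rolls:
--         counts[v] = counts.get(v, 0) + 1
--     uniques = [v for v in counts if counts[v] == 1]
--     if not uniques:
--         return None
--     return rolls.index(max(uniques)) + 1
-- ===== Notes on version B (the rewrite author's own statement) =====
-- stated objective: simpler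
-- what changed: Replaces the sort plus index-based neighbour scan (with its three special cases) by a single counting pass: build a value->count dict, collect the values occurring exactly once, and return the 1-based position of their maximum (None if there are none).
import Mathlib
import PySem

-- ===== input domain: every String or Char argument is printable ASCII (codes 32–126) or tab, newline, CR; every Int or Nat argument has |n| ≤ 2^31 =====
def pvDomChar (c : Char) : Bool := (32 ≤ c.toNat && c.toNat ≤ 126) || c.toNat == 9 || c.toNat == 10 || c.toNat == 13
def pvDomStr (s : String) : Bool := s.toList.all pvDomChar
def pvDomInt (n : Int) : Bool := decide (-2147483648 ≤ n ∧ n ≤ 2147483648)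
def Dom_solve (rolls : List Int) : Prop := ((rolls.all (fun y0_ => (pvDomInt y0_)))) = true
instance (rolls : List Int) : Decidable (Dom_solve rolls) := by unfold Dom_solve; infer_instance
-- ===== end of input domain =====

-- B replaces A's sort + index-based neighbour scan by one counting pass over a dict; objective: simpler.

-- ===== PORT A =====
-- A-side helper: roll[i]. Every access A performs is in range (len >= 2 on that path), so the
-- default of the PySem primitive is never taken; exact where Python does not raise.
def aGet (l : List Int) (i : Int) : Int := (PySem.List.pyGet? l i).getD 0
-- A-side helper: rolls.index(v) + 1. v always comes from the sorted copy of rolls, so it is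
-- present and Python's .index never raises; the default is never taken.
def aIdx1 (l : List Int) (v : Int) : Int := (((PySem.List.index? l v).getD 0 : Nat) : Int) + 1

def solve (rolls : List Int) : Option Int :=
  if rolls.length = 0 then none
  else if rolls.length = 1 then some 1
  else
    let roll := PySem.List.sorted rolls (fun x => x) true
    if aGet roll 0 ≠ aGet roll 1 then
      some (aIdx1 rolls (aGet roll 0))
    else
      match (PySem.List.pyRange 1 ((roll.length : Int) - 2) 1).findSome? (fun i =>
          if aGet roll i ≠ aGet roll (i+1) then
            (if aGet roll (i+1) ≠ aGet roll (i+2) then some (aIdx1 rolls (aGet roll (i+1))) else none)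
          else none) with
      | some r => some r
      | none =>
        if aGet roll ((rolls.length : Int) - 1) ≠ aGet roll ((rolls.length : Int) - 2) then
          some (aIdx1 rolls (aGet roll ((rolls.length : Int) - 1)))
        else none

-- ===== PORT B =====
def solve_alt (rolls : List Int) : Option Int :=
  let counts : PySem.Dict Int Int :=
    rolls.foldl (fun d v => d.insert v (d.getD v 0 + 1)) PySem.Dict.empty
  -- counts[v] for v iterated over the dict's keys: the key is present, so getD never defaults
  let uniques := counts.keys.filter (fun v => counts.getD v 0 == 1)
  if uniques.isEmpty then none
  else
    match PySem.List.max? uniques (fun x => x) with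
    | none => none   -- unreachable: uniques is nonempty here, max(...) always returns
    | some m => (PySem.List.index? rolls m).map (fun i => (i : Int) + 1)

-- ===== PRECONDITION & SPEC =====
def Spec_solve (rolls : List Int) (out : Option Int) : Prop := out = solve_alt rolls
instance (rolls : List Int) (out : Option Int) : Decidable (Spec_solve rolls out) := by unfold Spec_solve; infer_instance

-- ===== CLAIM (what is proved, stated in full; the proofs are below) =====
def Claim_equal_solve : Prop := ∀ (rolls : List Int), Dom_solve rolls → Spec_solve rolls (solve rolls)

-- ===== LEMMAS AND PROOFS =====

theorem aGet_int (s : List Int) (i : Int) (k : Nat) (hik : i = (k : Int)) (hk : k < s.length) :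
    aGet s i = s[k] := by
  subst hik
  simp [aGet, PySem.List.pyGet?_natCast, List.getElem?_eq_getElem hk]

theorem desc_getElem_le (s : List Int) (hs : s.Pairwise (fun a b => b ≤ a))
    (p q : Nat) (hpq : p ≤ q) (hq : q < s.length) :
    s[q] ≤ s[p]'(by omega) := by
  rcases Nat.lt_or_ge p q with h | h
  · exact (List.pairwise_iff_getElem.mp hs) p q (by omega) hq h
  · have hpq' : p = q := by omega
    subst hpq'; exact le_refl _

-- an element of a descending sorted list occurs once iff it differs from both neighbours
theorem count_one_iff (s : List Int) (hs : s.Pairwise (fun a b => b ≤ a))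
    (j : Nat) (hj : j < s.length) :
    s.count s[j] = 1 ↔
      ((∀ _ : 0 < j, s[j-1]'(by omega) ≠ s[j]) ∧ (∀ h1 : j+1 < s.length, s[j+1]'h1 ≠ s[j])) := by
  have hlen_take : (s.take j).length = j := by simp; omega
  have hsplit : s = s.take j ++ s[j] :: s.drop (j+1) := by
    conv_lhs => rw [← List.take_append_drop j s]
    rw [List.drop_eq_getElem_cons hj]
  have htake : s[j] ∈ s.take j ↔ (0 < j ∧ s[j-1]'(by omega) = s[j]) := by
    constructor
    · intro hm
      obtain ⟨k, hk, hke⟩ := List.mem_iff_getElem.mp hm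
      rw [hlen_take] at hk
      have hke' : s[k]'(by omega) = s[j] := by
        rw [← hke]; simp [List.getElem_take]
      have h1 : s[j] ≤ s[j-1]'(by omega) := desc_getElem_le s hs (j-1) j (by omega) hj
      have h2 : s[j-1]'(by omega) ≤ s[k]'(by omega) := desc_getElem_le s hs k (j-1) (by omega) (by omega)
      exact ⟨by omega, by omega⟩
    · rintro ⟨h0, he⟩
      have hx : (s.take j)[j-1]'(by rw [hlen_take]; omega) = s[j] := by
        rw [List.getElem_take]; exact he
      rw [← hx]; exact List.getElem_mem _
  have hdrop : s[j] ∈ s.drop (j+1) ↔ (j+1 < s.length ∧ ∀ h1 : j+1 < s.length, s[j+1]'h1 = s[j]) := by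
    constructor
    · intro hm
      obtain ⟨k, hk, hke⟩ := List.mem_iff_getElem.mp hm
      have hklen : j+1+k < s.length := by simp at hk; omega
      have hke' : s[j+1+k]'hklen = s[j] := by rw [← hke]; simp [List.getElem_drop]
      have h1 : s[j+1+k]'hklen ≤ s[j+1]'(by omega) := desc_getElem_le s hs (j+1) (j+1+k) (by omega) hklen
      have h2 : s[j+1]'(by omega) ≤ s[j] := desc_getElem_le s hs j (j+1) (by omega) (by omega)
      exact ⟨by omega, fun _ => by omega⟩
    · rintro ⟨h1, he⟩
      have hx : (s.drop (j+1))[0]'(by simp; omega) = s[j+1]'h1 := by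
        simp [List.getElem_drop]
      rw [← (he h1), ← hx]; exact List.getElem_mem _
  have hcnt : s.count s[j] = (s.take j).count s[j] + ((s.drop (j+1)).count s[j] + 1) := by
    have h := congrArg (List.count s[j]) hsplit
    rw [List.count_append, List.count_cons] at h
    simpa using h
  rw [hcnt]
  constructor
  · intro h1
    have ht0 : s[j] ∉ s.take j := by
      intro hm
      have : (s.take j).count s[j] ≠ 0 := by
        have := List.count_pos_iff.mpr hm; omega
      omega
    have hd0 : s[j] ∉ s.drop (j+1) := by
      intro hm
      have : (s.drop (j+1)).count s[j] ≠ 0 := by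
        have := List.count_pos_iff.mpr hm; omega
      omega
    constructor
    · intro h0 heq; exact ht0 (htake.mpr ⟨h0, heq⟩)
    · intro h1' heq; exact hd0 (hdrop.mpr ⟨h1', fun _ => heq⟩)
  · rintro ⟨hA, hB⟩
    have ht0 : (s.take j).count s[j] = 0 := by
      rw [List.count_eq_zero]
      intro hm
      obtain ⟨h0, he⟩ := htake.mp hm
      exact hA h0 he
    have hd0 : (s.drop (j+1)).count s[j] = 0 := by
      rw [List.count_eq_zero]
      intro hm
      obtain ⟨h1', he⟩ := hdrop.mp hm
      exact hB h1' (he h1')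
    omega

-- find? over a descending list returns the greatest element satisfying the predicate
theorem find?_desc_max (p : Int → Bool) :
    ∀ (s : List Int), s.Pairwise (fun a b => b ≤ a) → ∀ w, s.find? p = some w →
      ∀ u ∈ s, p u = true → u ≤ w := by
  intro s
  induction s with
  | nil => intro _ w hw; simp at hw
  | cons x t ih =>
    intro hp w hw u hu hpu
    rcases List.pairwise_cons.mp hp with ⟨hx, ht⟩
    by_cases hpx : p x = true
    · rw [List.find?_cons_of_pos hpx] at hw
      cases hw
      rcases List.mem_cons.mp hu with rfl | hut
      · exact le_refl _
      · exact hx u hut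
    · rw [List.find?_cons_of_neg (by simpa using hpx)] at hw
      rcases List.mem_cons.mp hu with rfl | hut
      · exact absurd hpu hpx
      · exact ih ht w hw u hut hpu

-- A's loop plus its final check equal find? on the sorted tail
theorem scan_eq (s rolls : List Int) (hs : s.Pairwise (fun a b => b ≤ a)) :
    ∀ (d a : Nat), 1 ≤ a → a + d + 2 = s.length →
      (match (PySem.List.pyRange (a : Int) ((s.length : Int) - 2) 1).findSome? (fun i =>
          if aGet s i ≠ aGet s (i+1) then
            (if aGet s (i+1) ≠ aGet s (i+2) then some (aIdx1 rolls (aGet s (i+1))) else none)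
          else none) with
       | some r => some r
       | none =>
         if aGet s ((s.length : Int) - 1) ≠ aGet s ((s.length : Int) - 2) then
           some (aIdx1 rolls (aGet s ((s.length : Int) - 1)))
         else none)
      = ((s.drop (a+1)).find? (fun v => s.count v == 1)).map (aIdx1 rolls) := by
  intro d
  induction d with
  | zero =>
    intro a ha hlen
    rw [PySem.List.pyRange_one_eq_nil (by omega)]
    simp only [List.findSome?_nil]
    rw [aGet_int s ((s.length : Int) - 1) (a+1) (by omega) (by omega),
        aGet_int s ((s.length : Int) - 2) a (by omega) (by omega)]
    have hdrop : s.drop (a+1) = [s[a+1]'(by omega)] := by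
      rw [List.drop_eq_getElem_cons (by omega)]
      rw [show a+1+1 = s.length by omega, List.drop_length]
    rw [hdrop]
    have hcnt := count_one_iff s hs (a+1) (by omega)
    by_cases hne : s[a]'(by omega) = s[a+1]'(by omega)
    · have hP : ¬ (s.count (s[a+1]'(by omega)) = 1) := by
        intro hc
        have h := (hcnt.mp hc).1 (by omega)
        simp only [Nat.add_sub_cancel] at h
        exact h hne
      rw [List.find?_cons_of_neg (by simpa using hP), List.find?_nil]
      rw [if_neg (by intro h; exact h hne.symm)]
      rfl
    · have hP : s.count (s[a+1]'(by omega)) = 1 := by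
        apply hcnt.mpr
        refine ⟨fun _ => ?_, fun h2 => by omega⟩
        simp only [Nat.add_sub_cancel]
        exact hne
      rw [List.find?_cons_of_pos (by simpa using hP)]
      rw [if_pos (fun h => hne h.symm)]
      rfl
  | succ d ih =>
    intro a ha hlen
    rw [PySem.List.pyRange_one_cons (by omega)]
    rw [List.findSome?_cons]
    rw [aGet_int s (a : Int) a (by omega) (by omega),
        aGet_int s ((a : Int)+1) (a+1) (by omega) (by omega),
        aGet_int s ((a : Int)+2) (a+2) (by omega) (by omega)]
    have hdrop : s.drop (a+1) = s[a+1]'(by omega) :: s.drop (a+2) := by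
      rw [List.drop_eq_getElem_cons (by omega)]
    have hcnt := count_one_iff s hs (a+1) (by omega)
    by_cases hX : s[a]'(by omega) = s[a+1]'(by omega)
    · -- left neighbour equal: loop body yields none, element not unique
      rw [if_neg (by intro h; exact h hX)]
      have hP : ¬ (s.count (s[a+1]'(by omega)) = 1) := by
        intro hc
        have h := (hcnt.mp hc).1 (by omega)
        simp only [Nat.add_sub_cancel] at h
        exact h hX
      rw [hdrop, List.find?_cons_of_neg (by simpa using hP)]
      rw [show ((a : Int) + 1) = ((a+1 : Nat) : Int) by omega]
      exact ih (a+1) (by omega) (by omega)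
    · rw [if_pos (fun h => hX h)]
      by_cases hY : s[a+1]'(by omega) = s[a+2]'(by omega)
      · -- right neighbour equal: loop body yields none, element not unique
        rw [if_neg (by intro h; exact h hY)]
        have hP : ¬ (s.count (s[a+1]'(by omega)) = 1) := by
          intro hc
          have h := (hcnt.mp hc).2 (by omega)
          exact h hY.symm
        rw [hdrop, List.find?_cons_of_neg (by simpa using hP)]
        rw [show ((a : Int) + 1) = ((a+1 : Nat) : Int) by omega]
        exact ih (a+1) (by omega) (by omega)
      · -- unique element found: both sides return it
        rw [if_pos (fun h => hY h)]
        have hP : s.count (s[a+1]'(by omega)) = 1 := by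
          apply hcnt.mpr
          refine ⟨fun _ => ?_, fun _ => fun h => hY h.symm⟩
          simp only [Nat.add_sub_cancel]
          exact hX
        rw [hdrop, List.find?_cons_of_pos (by simpa using hP)]
        rfl

-- A computes: find the first (= greatest) unique value of the descending sorted copy
theorem solve_eq_find (rolls : List Int) :
    solve rolls =
      ((PySem.List.sorted rolls (fun x => x) true).find?
          (fun v => (PySem.List.sorted rolls (fun x => x) true).count v == 1)).map (aIdx1 rolls) := by
  have hperm : (PySem.List.sorted rolls (fun x => x) true).Perm rolls :=
    PySem.List.sorted_perm rolls (fun x => x) true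
  have hlen : (PySem.List.sorted rolls (fun x => x) true).length = rolls.length := hperm.length_eq
  have hdesc : (PySem.List.sorted rolls (fun x => x) true).Pairwise (fun a b => b ≤ a) :=
    PySem.List.sorted_pairwise_rev rolls (fun x => x)
  set s := PySem.List.sorted rolls (fun x => x) true with hs_def
  rcases Nat.lt_or_ge rolls.length 2 with hsmall | h2
  · rcases Nat.lt_or_ge rolls.length 1 with h0 | h1
    · -- empty list
      have hr : rolls = [] := List.length_eq_zero_iff.mp (by omega)
      have hsnil : s = [] := List.length_eq_zero_iff.mp (by omega)
      rw [hsnil]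
      simp [solve, hr]
    · -- singleton
      have hlen1 : rolls.length = 1 := by omega
      have hs1 : s.length = 1 := by omega
      obtain ⟨x, hx⟩ := List.length_eq_one_iff.mp hs1
      have hrx : rolls = [x] := by
        obtain ⟨y, hy⟩ := List.length_eq_one_iff.mp hlen1
        have : x ∈ rolls := hperm.mem_iff.mp (by rw [hx]; exact List.mem_cons_self)
        rw [hy] at this ⊢
        simp at this
        rw [this]
      rw [hx, hrx]
      simp [solve, aIdx1, List.count_cons]
  · -- length ≥ 2
    have hs2 : 2 ≤ s.length := by omega
    have hne0 : ¬ (rolls.length = 0) := by omega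
    have hne1 : ¬ (rolls.length = 1) := by omega
    simp only [solve, if_neg hne0, if_neg hne1, ← hs_def]
    rw [aGet_int s 0 0 (by omega) (by omega), aGet_int s 1 1 (by omega) (by omega)]
    have hcons : s = s[0]'(by omega) :: s.drop 1 := by
      have h := List.drop_eq_getElem_cons (show 0 < s.length by omega)
      simpa using h
    have hcons1 : s.drop 1 = s[1]'(by omega) :: s.drop 2 := by
      rw [List.drop_eq_getElem_cons (by omega)]
    by_cases hne : s[0]'(by omega) = s[1]'(by omega)
    · rw [if_neg (by intro h; exact h hne)]
      have hP0 : ¬ (s.count (s[0]'(by omega)) = 1) := by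
        intro hc
        have h := (count_one_iff s hdesc 0 (by omega)).mp hc
        exact h.2 (by omega) hne.symm
      have hP1 : ¬ (s.count (s[1]'(by omega)) = 1) := by
        intro hc
        have h := (count_one_iff s hdesc 1 (by omega)).mp hc
        exact h.1 (by omega) hne
      have hls : s = s[0]'(by omega) :: s[1]'(by omega) :: s.drop 2 := by
        conv_lhs => rw [hcons]
        rw [hcons1]
      have hfind : s.find? (fun v => s.count v == 1) = (s.drop 2).find? (fun v => s.count v == 1) := by
        rw [congrArg (List.find? (fun v => s.count v == 1)) hls,
            List.find?_cons_of_neg (by simpa using hP0),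
            List.find?_cons_of_neg (by simpa using hP1)]
      rw [hfind]
      rcases Nat.lt_or_ge rolls.length 3 with h2' | h3
      · -- length exactly 2
        have hlen2 : s.length = 2 := by omega
        rw [PySem.List.pyRange_one_eq_nil (by omega)]
        simp only [List.findSome?_nil]
        rw [show ((rolls.length : Int) - 1) = ((1 : Nat) : Int) by omega,
            show ((rolls.length : Int) - 2) = ((0 : Nat) : Int) by omega,
            aGet_int s ((1 : Nat) : Int) 1 rfl (by omega),
            aGet_int s ((0 : Nat) : Int) 0 rfl (by omega)]
        rw [if_neg (by intro h; exact h hne.symm)]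
        rw [show (2 : Nat) = s.length by omega, List.drop_length]
        rfl
      · -- length ≥ 3: the loop lemma
        have hsc := scan_eq s rolls hdesc (rolls.length - 3) 1 (by omega) (by omega)
        simp only [Nat.cast_one, Nat.reduceAdd] at hsc
        rw [show ((rolls.length : Int)) = ((s.length : Int)) by omega]
        exact hsc
    · rw [if_pos (fun h => hne h)]
      have hP0 : s.count (s[0]'(by omega)) = 1 := by
        apply (count_one_iff s hdesc 0 (by omega)).mpr
        exact ⟨fun h => by omega, fun _ h => hne h.symm⟩
      rw [congrArg (List.find? (fun v => s.count v == 1)) hcons,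
          List.find?_cons_of_pos (by simpa using hP0)]
      rfl

-- B computes the same
theorem solve_alt_eq_find (rolls : List Int) :
    solve_alt rolls =
      ((PySem.List.sorted rolls (fun x => x) true).find?
          (fun v => (PySem.List.sorted rolls (fun x => x) true).count v == 1)).map (aIdx1 rolls) := by
  have hperm : (PySem.List.sorted rolls (fun x => x) true).Perm rolls :=
    PySem.List.sorted_perm rolls (fun x => x) true
  have hdesc : (PySem.List.sorted rolls (fun x => x) true).Pairwise (fun a b => b ≤ a) :=
    PySem.List.sorted_pairwise_rev rolls (fun x => x)
  set s := PySem.List.sorted rolls (fun x => x) true with hs_def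
  have hcs : ∀ v, s.count v = rolls.count v := fun v => hperm.count_eq v
  have hms : ∀ v, v ∈ s ↔ v ∈ rolls := fun v => hperm.mem_iff
  have hbody : solve_alt rolls =
      (let uniques := (PySem.Dict.counter rolls).keys.filter
          (fun v => (PySem.Dict.counter rolls).getD v 0 == 1)
       if uniques.isEmpty then none
       else match PySem.List.max? uniques (fun x => x) with
            | none => none
            | some m => (PySem.List.index? rolls m).map (fun i => (i : Int) + 1)) := rfl
  rw [hbody]
  simp only [PySem.Dict.keys_counter, PySem.Dict.getD_counter]
  have hU : ∀ v, v ∈ (PySem.Set.ofList rolls).filter (fun v => ((rolls.count v : Int) == 1)) ↔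
      (v ∈ rolls ∧ rolls.count v = 1) := by
    intro v
    simp only [List.mem_filter, PySem.Set.mem_ofList, beq_iff_eq]
    constructor
    · rintro ⟨h1, h2⟩; exact ⟨h1, by omega⟩
    · rintro ⟨h1, h2⟩; exact ⟨h1, by omega⟩
  by_cases hex : ∃ v ∈ rolls, rolls.count v = 1
  · obtain ⟨v₀, hv₀m, hv₀c⟩ := hex
    have hUne : (PySem.Set.ofList rolls).filter (fun v => ((rolls.count v : Int) == 1)) ≠ [] := by
      intro h
      have := (hU v₀).mpr ⟨hv₀m, hv₀c⟩
      rw [h] at this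
      simp at this
    rw [if_neg (by simpa [List.isEmpty_iff] using hUne)]
    obtain ⟨m, hm⟩ : ∃ m, PySem.List.max? ((PySem.Set.ofList rolls).filter (fun v => ((rolls.count v : Int) == 1))) (fun x => x) = some m := by
      rcases h : PySem.List.max? ((PySem.Set.ofList rolls).filter (fun v => ((rolls.count v : Int) == 1))) (fun x => x) with _ | m
      · exact absurd ((PySem.List.max?_eq_none_iff _ _).mp h) hUne
      · exact ⟨m, rfl⟩
    rw [hm]
    have hmU := (hU m).mp (PySem.List.max?_mem hm)
    -- the find? side returns some w
    obtain ⟨w, hw⟩ : ∃ w, s.find? (fun v => s.count v == 1) = some w := by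
      rcases h : s.find? (fun v => s.count v == 1) with _ | w
      · have := List.find?_eq_none.mp h v₀ ((hms v₀).mpr hv₀m)
        simp [hcs v₀, hv₀c] at this
      · exact ⟨w, rfl⟩
    rw [hw]
    have hwP : s.count w = 1 := by simpa using List.find?_some hw
    have hwm : w ∈ s := List.mem_of_find?_eq_some hw
    have hwc : rolls.count w = 1 := by rw [← hcs]; exact hwP
    have hwr : w ∈ rolls := (hms w).mp hwm
    -- m = w
    have hmw : m ≤ w := find?_desc_max _ s hdesc w hw m ((hms m).mpr hmU.1)
      (by simp [hcs m, hmU.2])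
    have hwm' : w ≤ m := PySem.List.max?_isMax hm w ((hU w).mpr ⟨hwr, hwc⟩)
    have : m = w := le_antisymm hmw hwm'
    subst this
    obtain ⟨k, hk⟩ : ∃ k, PySem.List.index? rolls m = some k := by
      rcases h : PySem.List.index? rolls m with _ | k
      · exact absurd ((PySem.List.index?_eq_none_iff _ _).mp h) (by simpa using hmU.1)
      · exact ⟨k, rfl⟩
    rw [PySem.List.index?_eq_idxOf?] at hk
    simp [aIdx1, hk]
  · have hUnil : (PySem.Set.ofList rolls).filter (fun v => ((rolls.count v : Int) == 1)) = [] := by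
      rw [List.eq_nil_iff_forall_not_mem]
      intro v hv
      exact hex ⟨v, ((hU v).mp hv).1, ((hU v).mp hv).2⟩
    rw [if_pos (by simp [hUnil])]
    have : s.find? (fun v => s.count v == 1) = none := by
      rw [List.find?_eq_none]
      intro v hv
      simp only [beq_iff_eq]
      intro hc
      exact hex ⟨v, (hms v).mp hv, by rw [← hcs]; exact hc⟩
    rw [this]
    rfl

-- ===== VERDICT (by name: the statement is the Claim_ definition above) =====
theorem solve_spec : Claim_equal_solve := by
  intro rolls _
  unfold Spec_solve
  rw [solve_eq_find, solve_alt_eq_find]
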